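-- pv_equiv track=rewrite | github.com/meelgroup/barbarik | barbarik.py | getCNF
-- ===== SOURCE A (Python) =====
-- def pushVar(variable, cnfClauses):
--     cnfLen = len(cnfClauses)
--     for i in range(cnfLen):
--         cnfClauses[i].append(variable)
--     return cnfClauses
--
-- def getCNF(variable, binStr, sign, origTotalVars):
--     cnfClauses = []
--     binLen = len(binStr)
--     if sign is False:
--         cnfClauses.append([-(binLen+1+origTotalVars)])
--     else:
--         cnfClauses.append([binLen+1+origTotalVars])
--
--     for i in range(binLen):
--         newVar = int(binLen-i+origTotalVars)
--         if sign is False: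
--             newVar = -1*(binLen-i+origTotalVars)
--
--         if (binStr[binLen-i-1] == '0'):
--             cnfClauses.append([newVar])
--         else:
--             cnfClauses = pushVar(newVar, cnfClauses)
--     pushVar(variable, cnfClauses)
--     return cnfClauses
-- ===== SOURCE B (Python) =====
-- def getCNF(variable, binStr, sign, origTotalVars):
--     # Two-pass decomposition: record '1'-bit literals and clause heads, then
--     # assemble each clause once (each '1' literal lands in all clauses opened
--     # before it; 'variable' closes every clause).
--     binLen = len(binStr)
--     neg = -1 if sign is False else 1
--     ones = []
--     heads = [(neg * (binLen + 1 + origTotalVars), 0)]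
--     for i in range(binLen):
--         lit = neg * (binLen - i + origTotalVars)
--         if binStr[binLen - i - 1] == '0':
--             heads.append((lit, len(ones)))
--         else:
--             ones.append(lit)
--     return [[h] + ones[s:] + [variable] for (h, s) in heads]
-- ===== Notes on version B (the rewrite author's own statement) =====
-- stated objective: alternative
-- what changed: Instead of repeatedly appending each '1' literal to every clause built so far (pushVar inner loop), B makes one pass recording '1' literals and clause heads with their creation offsets, then assembles each clause once from a slice.
import Mathlib
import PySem

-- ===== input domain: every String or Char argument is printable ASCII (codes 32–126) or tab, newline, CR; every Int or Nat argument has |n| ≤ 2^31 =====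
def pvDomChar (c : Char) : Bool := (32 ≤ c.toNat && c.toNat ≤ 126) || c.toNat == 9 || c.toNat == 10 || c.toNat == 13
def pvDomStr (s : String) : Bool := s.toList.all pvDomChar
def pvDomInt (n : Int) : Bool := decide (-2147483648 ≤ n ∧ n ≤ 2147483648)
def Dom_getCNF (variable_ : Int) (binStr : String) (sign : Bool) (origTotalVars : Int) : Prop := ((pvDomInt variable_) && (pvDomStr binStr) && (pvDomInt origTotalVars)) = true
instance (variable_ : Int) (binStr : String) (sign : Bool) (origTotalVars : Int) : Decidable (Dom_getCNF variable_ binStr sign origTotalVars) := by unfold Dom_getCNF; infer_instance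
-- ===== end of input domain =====

-- B replaces A's repeated whole-CNF rewrites (pushVar) by one pass collecting
-- '1' literals and clause heads, then assembles each clause once; same results.

-- ===== PORT A =====
def pushVar (variable_ : Int) (cnfClauses : List (List Int)) : List (List Int) :=
  cnfClauses.map (fun c => c ++ [variable_])

def getCNF (variable_ : Int) (binStr : String) (sign : Bool) (origTotalVars : Int) : List (List Int) :=
  let cs := binStr.toList
  let binLen : Int := (cs.length : Int)
  let init : List (List Int) :=
    if sign = false then [[-(binLen + 1 + origTotalVars)]] else [[binLen + 1 + origTotalVars]]
  let cnf := (PySem.List.pyRange 0 binLen 1).foldl (fun cnf i =>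
    let newVar : Int :=
      if sign = false then -1 * (binLen - i + origTotalVars) else binLen - i + origTotalVars
    if PySem.List.pyGet? cs (binLen - i - 1) == some '0' then cnf ++ [[newVar]]
    else pushVar newVar cnf) init
  pushVar variable_ cnf

-- ===== PORT B =====
def getCNF_alt (variable_ : Int) (binStr : String) (sign : Bool) (origTotalVars : Int) : List (List Int) :=
  let cs := binStr.toList
  let binLen : Int := (cs.length : Int)
  let neg : Int := if sign = false then -1 else 1
  let st := (PySem.List.pyRange 0 binLen 1).foldl
    (fun (st : List Int × List (Int × Nat)) i =>
      let lit := neg * (binLen - i + origTotalVars)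
      if PySem.List.pyGet? cs (binLen - i - 1) == some '0'
      then (st.1, st.2 ++ [(lit, st.1.length)])
      else (st.1 ++ [lit], st.2))
    (([] : List Int), [(neg * (binLen + 1 + origTotalVars), 0)])
  st.2.map (fun p => [p.1] ++ st.1.drop p.2 ++ [variable_])

-- ===== PRECONDITION & SPEC =====
def Spec_getCNF (variable_ : Int) (binStr : String) (sign : Bool) (origTotalVars : Int) (out : List (List Int)) : Prop := out = getCNF_alt variable_ binStr sign origTotalVars
instance (variable_ : Int) (binStr : String) (sign : Bool) (origTotalVars : Int) (out : List (List Int)) : Decidable (Spec_getCNF variable_ binStr sign origTotalVars out) := by unfold Spec_getCNF; infer_instance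

-- ===== CLAIM (what is proved, stated in full; the proofs are below) =====
def Claim_equal_getCNF : Prop := ∀ (variable_ : Int) (binStr : String) (sign : Bool) (origTotalVars : Int), Dom_getCNF variable_ binStr sign origTotalVars → Spec_getCNF variable_ binStr sign origTotalVars (getCNF variable_ binStr sign origTotalVars)

-- ===== LEMMAS AND PROOFS =====

/-- Invariant connecting A's clause list with B's (ones, heads) state:
    A's CNF is exactly the heads, each followed by the '1' literals recorded
    since its creation. -/
lemma chain_inv (cond : Int → Bool) (lit : Int → Int) :
    ∀ (idxs : List Int) (ones : List Int) (heads : List (Int × Nat)),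
      (∀ p ∈ heads, p.2 ≤ ones.length) →
      idxs.foldl (fun cnf i =>
          if cond i then cnf ++ [[lit i]] else cnf.map (fun c => c ++ [lit i]))
        (heads.map (fun p => p.1 :: ones.drop p.2))
      = (fun st : List Int × List (Int × Nat) =>
          st.2.map (fun p => p.1 :: st.1.drop p.2))
        (idxs.foldl (fun st i =>
          if cond i then (st.1, st.2 ++ [(lit i, st.1.length)])
          else (st.1 ++ [lit i], st.2)) (ones, heads)) := by
  intro idxs
  induction idxs with
  | nil => intro ones heads _; rfl
  | cons i idxs ih =>
    intro ones heads h
    simp only [List.foldl_cons]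
    cases hc : cond i
    · simp only [Bool.false_eq_true, if_false]
      have heq : (heads.map (fun p => p.1 :: ones.drop p.2)).map (fun c => c ++ [lit i])
          = heads.map (fun p => p.1 :: (ones ++ [lit i]).drop p.2) := by
        rw [List.map_map]
        refine List.map_congr_left ?_
        intro p hp
        have hle := h p hp
        simp [List.drop_append_of_le_length hle]
      rw [heq, ih (ones ++ [lit i]) heads]
      intro p hp
      have := h p hp
      simp
      omega
    · simp only [if_true]
      have heq : heads.map (fun p => p.1 :: ones.drop p.2) ++ [[lit i]]
          = (heads ++ [(lit i, ones.length)]).map (fun p => p.1 :: ones.drop p.2) := by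
        simp [List.map_append, List.drop_length]
      rw [heq, ih ones (heads ++ [(lit i, ones.length)])]
      intro p hp
      rcases List.mem_append.mp hp with h1 | h2
      · exact h p h1
      · simp only [List.mem_singleton] at h2
        subst h2
        simp

/-- Bridge: A's fold-then-append over an initial single clause equals B's
    state fold rendered through the clause-assembly map. -/
lemma bridge (v h0 : Int) (idxs : List Int) (cond : Int → Bool) (lit : Int → Int) :
    (idxs.foldl (fun cnf i =>
        if cond i then cnf ++ [[lit i]] else cnf.map (fun c => c ++ [lit i])) [[h0]]).map
      (fun c => c ++ [v])
    = (fun st : List Int × List (Int × Nat) =>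
        st.2.map (fun p => [p.1] ++ st.1.drop p.2 ++ [v]))
      (idxs.foldl (fun st i =>
        if cond i then (st.1, st.2 ++ [(lit i, st.1.length)])
        else (st.1 ++ [lit i], st.2)) (([] : List Int), [(h0, 0)])) := by
  have h := chain_inv cond lit idxs [] [(h0, 0)] (by simp)
  have hinit : ([[h0]] : List (List Int))
      = ([(h0, (0 : Nat))]).map (fun p => p.1 :: ([] : List Int).drop p.2) := rfl
  rw [hinit, h]
  simp [List.map_map, Function.comp]

-- ===== VERDICT (by name: the statement is the Claim_ definition above) =====
theorem getCNF_spec : Claim_equal_getCNF := by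
  intro variable_ binStr sign origTotalVars _
  unfold Spec_getCNF getCNF getCNF_alt pushVar
  cases sign
  · simp only [reduceIte]
    rw [show -(((binStr.toList.length : Int)) + 1 + origTotalVars)
          = -1 * (((binStr.toList.length : Int)) + 1 + origTotalVars) from by ring]
    exact bridge _ _ _ _ _
  · simp only [Bool.true_eq_false, if_false, one_mul]
    exact bridge _ _ _ _ _
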